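-- pv_equiv track=rewrite | github.com/maboke123/P-O2 | Optimalisatie_startfile.py | examine
-- ===== SOURCE A (Python) =====
-- ACCEPT = 'accept'
--
-- ABANDON = 'abandon'
--
-- CONTINUE = 'continue'
--
-- def examine(partial_solution, distancematrix):
--     #Checken of dezelfde node niet nog is bezocht wordt
--     for i in range(len(partial_solution)):
--         for j in range(i + 1,len(partial_solution)):
--             if partial_solution[i] == partial_solution[j]:
--                 return ABANDON
--
--     #Checken of de oplossing alle nodes bevat
--     if len(partial_solution) == len(distancematrix):
--         #Checke of de laatste node wel degelijk de finish node is
--         if partial_solution[-1] == len(distancematrix) - 1: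
--             return ACCEPT
--         return ABANDON
--
--     return CONTINUE
-- ===== SOURCE B (Python) =====
-- ACCEPT = 'accept'
--
-- ABANDON = 'abandon'
--
-- CONTINUE = 'continue'
--
-- def examine(partial_solution, distancematrix):
--     # Duplicate check: sort a copy, then scan adjacent pairs once.
--     s = sorted(partial_solution)
--     for a, b in zip(s, s[1:]):
--         if a == b:
--             return ABANDON
--
--     if len(partial_solution) == len(distancematrix):
--         if partial_solution[-1] == len(distancematrix) - 1:
--             return ACCEPT
--         return ABANDON
--
--     return CONTINUE
-- ===== Notes on version B (the rewrite author's own statement) =====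
-- stated objective: alternative
-- what changed: Replaces the quadratic nested all-pairs duplicate scan with sorting a copy and a single adjacent-pair scan; the trailing length/finish-node guards are kept.
import Mathlib
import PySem

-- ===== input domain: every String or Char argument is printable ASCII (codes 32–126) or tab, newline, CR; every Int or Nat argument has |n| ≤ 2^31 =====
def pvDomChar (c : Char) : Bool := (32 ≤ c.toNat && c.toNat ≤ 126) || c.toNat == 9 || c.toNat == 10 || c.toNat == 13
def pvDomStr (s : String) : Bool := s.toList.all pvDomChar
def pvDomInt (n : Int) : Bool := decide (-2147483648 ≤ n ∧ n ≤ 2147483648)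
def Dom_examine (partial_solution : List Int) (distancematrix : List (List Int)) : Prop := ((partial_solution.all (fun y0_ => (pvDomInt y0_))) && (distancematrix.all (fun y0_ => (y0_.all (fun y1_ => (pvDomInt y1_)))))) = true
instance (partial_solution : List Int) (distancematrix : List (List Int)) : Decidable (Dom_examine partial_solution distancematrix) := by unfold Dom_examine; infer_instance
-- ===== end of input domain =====

-- B replaces A's nested all-pairs duplicate scan with sort-a-copy + one adjacent-pair scan (alternative decomposition; same results).

-- ===== PORT A =====
def examine (partial_solution : List Int) (distancematrix : List (List Int)) : String :=
  -- nested index loops with early return ABANDON on any equal pair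
  let n : Int := partial_solution.length
  if (PySem.List.pyRange 0 n 1).any (fun i =>
      (PySem.List.pyRange (i + 1) n 1).any (fun j =>
        PySem.List.pyGet? partial_solution i == PySem.List.pyGet? partial_solution j)) then
    "abandon"
  else if (partial_solution.length : Int) = (distancematrix.length : Int) then
    if PySem.List.pyGet? partial_solution (-1) == some ((distancematrix.length : Int) - 1) then
      "accept"
    else "abandon"
  else "continue"

-- ===== PORT B =====
-- for a, b in zip(s, s[1:]): early return ABANDON when a == b
def bAdjDup (s : List Int) : Bool :=
  ((s.zip (PySem.List.slice s (some 1) none)).any (fun p => p.1 == p.2))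

def examine_alt (partial_solution : List Int) (distancematrix : List (List Int)) : String :=
  let s := PySem.List.sorted partial_solution (fun x => x) false
  if bAdjDup s then
    "abandon"
  else if (partial_solution.length : Int) = (distancematrix.length : Int) then
    if PySem.List.pyGet? partial_solution (-1) == some ((distancematrix.length : Int) - 1) then
      "accept"
    else "abandon"
  else "continue"

-- ===== PRECONDITION & SPEC =====
-- A (and B) raise IndexError via partial_solution[-1] only when both lists are empty; excluded.
def Pre_examine (partial_solution : List Int) (distancematrix : List (List Int)) : Prop :=
  ¬ (partial_solution = [] ∧ distancematrix = [])
instance (partial_solution : List Int) (distancematrix : List (List Int)) : Decidable (Pre_examine partial_solution distancematrix) := by unfold Pre_examine; infer_instance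
def pvWitness_examine : List Int × List (List Int) := ([0, 1], [[0, 1], [1, 0]])

def Spec_examine (partial_solution : List Int) (distancematrix : List (List Int)) (out : String) : Prop := out = examine_alt partial_solution distancematrix
instance (partial_solution : List Int) (distancematrix : List (List Int)) (out : String) : Decidable (Spec_examine partial_solution distancematrix out) := by unfold Spec_examine; infer_instance

-- ===== CLAIM (what is proved, stated in full; the proofs are below) =====
def Claim_equal_examine : Prop := ∀ (partial_solution : List Int) (distancematrix : List (List Int)), Dom_examine partial_solution distancematrix → Pre_examine partial_solution distancematrix → Spec_examine partial_solution distancematrix (examine partial_solution distancematrix)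

-- ===== LEMMAS AND PROOFS =====

-- A's nested scan fires iff the list has a duplicate
theorem aDup_iff_not_nodup (ps : List Int) :
    ((PySem.List.pyRange 0 (ps.length : Int) 1).any (fun i =>
      (PySem.List.pyRange (i + 1) (ps.length : Int) 1).any (fun j =>
        PySem.List.pyGet? ps i == PySem.List.pyGet? ps j)) = true) ↔ ¬ ps.Nodup := by
  rw [List.nodup_iff_getElem?_ne_getElem?]
  simp only [List.any_eq_true, PySem.List.mem_pyRange_one, not_forall]
  constructor
  · rintro ⟨i, ⟨hi0, hin⟩, j, ⟨hji, hjn⟩, hij⟩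
    refine ⟨i.toNat, j.toNat, by omega, by omega, ?_⟩
    rw [PySem.List.pyGet?_of_nonneg ps hi0, PySem.List.pyGet?_of_nonneg ps (show (0:Int) ≤ j by omega)] at hij
    simpa using hij
  · rintro ⟨i, j, hij, hjn, heq⟩
    simp only [not_not] at heq
    refine ⟨(i : Int), ⟨by omega, by omega⟩, (j : Int), ⟨by omega, by omega⟩, ?_⟩
    rw [PySem.List.pyGet?_natCast, PySem.List.pyGet?_natCast, heq]
    simp

-- B's adjacent scan on a ≤-sorted list fires iff the list has a duplicate
theorem adjAux (s : List Int) (hs : s.Pairwise (· ≤ ·)) :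
    ((s.zip (s.drop 1)).any (fun p => p.1 == p.2) = true) ↔ ¬ s.Nodup := by
  induction s with
  | nil => simp
  | cons a t ih =>
    match t, hs with
    | [], _ => simp
    | b :: t, hs =>
      have hab : a ≤ b := (List.pairwise_cons.mp hs).1 b (by simp)
      have htl := (List.pairwise_cons.mp hs).2
      by_cases hEq : a = b
      · subst hEq
        simp [List.nodup_cons]
      · have h1 : ((a :: b :: t).zip ((a :: b :: t).drop 1)).any (fun p => p.1 == p.2)
            = ((b :: t).zip ((b :: t).drop 1)).any (fun p => p.1 == p.2) := by
          simp [hEq]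
        rw [h1, ih htl]
        have haNot : a ∉ b :: t := by
          intro hmem
          rcases List.mem_cons.mp hmem with h | h
          · exact hEq h
          · have hbx : b ≤ a := (List.pairwise_cons.mp htl).1 a h
            exact hEq (le_antisymm hab hbx)
        constructor
        · intro hnd hcon
          exact hnd (List.Nodup.of_cons hcon)
        · intro hcon hnd
          exact hcon (List.nodup_cons.mpr ⟨haNot, hnd⟩)

theorem adjDup_of_sorted (s : List Int) (hs : s.Pairwise (· ≤ ·)) :
    bAdjDup s = true ↔ ¬ s.Nodup := by
  unfold bAdjDup
  rw [PySem.List.slice_from (ha := by norm_num)]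
  have h0 : Int.toNat 1 = 1 := rfl
  rw [h0]
  exact adjAux s hs

theorem dup_checks_agree (ps : List Int) :
    ((PySem.List.pyRange 0 (ps.length : Int) 1).any (fun i =>
      (PySem.List.pyRange (i + 1) (ps.length : Int) 1).any (fun j =>
        PySem.List.pyGet? ps i == PySem.List.pyGet? ps j)))
    = bAdjDup (PySem.List.sorted ps (fun x => x) false) := by
  have hperm : (PySem.List.sorted ps (fun x => x) false).Perm ps := PySem.List.sorted_perm ps _ _
  have hpw : (PySem.List.sorted ps (fun x => x) false).Pairwise (fun a b => a ≤ b) :=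
    PySem.List.sorted_pairwise ps _
  rcases hA : ((PySem.List.pyRange 0 (ps.length : Int) 1).any (fun i =>
      (PySem.List.pyRange (i + 1) (ps.length : Int) 1).any (fun j =>
        PySem.List.pyGet? ps i == PySem.List.pyGet? ps j))) with _ | _
  · have h1 : ¬ ¬ ps.Nodup := by
      rw [← aDup_iff_not_nodup]; simp [hA]
    have : (PySem.List.sorted ps (fun x => x) false).Nodup := (hperm.nodup_iff).mpr (not_not.mp h1)
    have := (adjDup_of_sorted _ hpw)
    rcases hB : bAdjDup (PySem.List.sorted ps (fun x => x) false) with _ | _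
    · rfl
    · exact absurd ‹(PySem.List.sorted ps (fun x => x) false).Nodup› ((this.mp hB))
  · have h1 : ¬ ps.Nodup := (aDup_iff_not_nodup ps).mp hA
    have h2 : ¬ (PySem.List.sorted ps (fun x => x) false).Nodup := fun h => h1 ((hperm.nodup_iff).mp h)
    exact ((adjDup_of_sorted _ hpw).mpr h2).symm

-- ===== VERDICT (by name: the statement is the Claim_ definition above) =====
theorem examine_spec : Claim_equal_examine := by
  intro ps dm _ _
  unfold Spec_examine examine examine_alt
  simp only [dup_checks_agree]
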